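-- pv_equiv track=rewrite | github.com/R-Kogure/AtCoder | ABC/ABC192C.py | gg
-- ===== SOURCE A (Python) =====
-- def gg(x):
--     tmp = len(str(x))
--     l = []
--     for i in range(tmp):
--         l.append(int(str(x)[i]))
--     num = 0
--     l.sort(reverse = True)
--     for i in range(tmp):
--         num += l[i]*10**i
--     return num
-- ===== SOURCE B (Python) =====
-- def gg(x):
--     # counting sort of the digits of x, then Horner reassembly (ascending digits)
--     counts = [0] * 10
--     for c in str(x):
--         counts[int(c)] += 1
--     num = 0
--     for d in range(10):
--         for _ in range(counts[d]):
--             num = num * 10 + d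
--     return num
-- ===== Notes on version B (the rewrite author's own statement) =====
-- stated objective: alternative
-- what changed: B replaces A's comparison sort of the digit list and positional sum of l[i]*10**i by a 10-bucket counting sort over str(x) followed by a Horner-style reassembly num = num*10 + d over the ascending digits.
import Mathlib
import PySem

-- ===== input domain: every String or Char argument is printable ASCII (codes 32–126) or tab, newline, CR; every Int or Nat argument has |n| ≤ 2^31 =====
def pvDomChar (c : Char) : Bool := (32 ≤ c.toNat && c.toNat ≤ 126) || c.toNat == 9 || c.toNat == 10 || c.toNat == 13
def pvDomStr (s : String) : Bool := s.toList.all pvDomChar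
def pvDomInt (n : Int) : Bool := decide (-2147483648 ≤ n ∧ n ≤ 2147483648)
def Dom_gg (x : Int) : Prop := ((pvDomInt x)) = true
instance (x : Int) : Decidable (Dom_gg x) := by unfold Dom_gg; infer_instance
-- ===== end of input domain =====

-- B replaces A's comparison sort + positional 10**i accumulation by a counting sort of the
-- digits followed by Horner reassembly (objective: alternative algorithm).

-- ===== PORT A =====
def gg (x : Int) : Int :=
  let s := PySem.Int.toChars x                 -- str(x)
  let tmp : Int := PySem.List.len s            -- len(str(x))
  -- for i in range(tmp): l.append(int(str(x)[i]))
  -- int(str(x)[i]) is ofChars? of the one-char slice; none = ValueError, excluded by Pre_gg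
  let l : List Int := (PySem.List.pyRange 0 tmp).foldl
    (fun acc i => acc ++ [(PySem.Int.ofChars? [PySem.List.pyGetD s i ' ']).getD 0]) []
  let lsorted := PySem.List.sorted l (fun v => v) true   -- l.sort(reverse=True)
  -- for i in range(tmp): num += l[i]*10**i   (i ≥ 0 here, so 10**i = 10 ^ i.toNat exactly)
  (PySem.List.pyRange 0 tmp).foldl
    (fun num i => num + PySem.List.pyGetD lsorted i 0 * 10 ^ i.toNat) 0

-- ===== PORT B =====
-- loop body of "for c in str(x): counts[int(c)] += 1"
-- int(c) raises ValueError on '-' (x < 0), excluded by Pre_gg; its value is 0..9 there,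
-- so the .toNat index is exact
def ggAltStep (cnt : List Int) (c : Char) : List Int :=
  let d := ((PySem.Int.ofChars? [c]).getD 0).toNat
  cnt.set d (cnt.getD d 0 + 1)

def gg_alt (x : Int) : Int :=
  -- counts = [0]*10; for c in str(x): counts[int(c)] += 1
  let counts : List Int := (PySem.Int.toChars x).foldl ggAltStep (List.replicate 10 0)
  -- num = 0; for d in range(10): for _ in range(counts[d]): num = num*10 + d
  (PySem.List.pyRange 0 10).foldl
    (fun num d =>
      (PySem.List.pyRange 0 (PySem.List.pyGetD counts d 0)).foldl
        (fun n _ => n * 10 + d) num)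
    0

-- ===== PRECONDITION & SPEC =====
-- Pre_gg excludes x < 0: there str(x) starts with '-' and int('-') raises ValueError in
-- both A and B.
def Pre_gg (x : Int) : Prop := 0 ≤ x
instance (x : Int) : Decidable (Pre_gg x) := by unfold Pre_gg; infer_instance
def pvWitness_gg : Int := 2110
def Spec_gg (x : Int) (out : Int) : Prop := out = gg_alt x
instance (x : Int) (out : Int) : Decidable (Spec_gg x out) := by unfold Spec_gg; infer_instance

-- ===== CLAIM (what is proved, stated in full; the proofs are below) =====
def Claim_equal_gg : Prop := ∀ (x : Int), Dom_gg x → Pre_gg x → Spec_gg x (gg x)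

-- ===== LEMMAS AND PROOFS =====

-- digit value of a digit character
def pvDv (c : Char) : Int := (c.toNat : Int) - 48

def pvDigits : List Char := ['0','1','2','3','4','5','6','7','8','9']

-- little-endian value: Σ L[i] * 10^i
def pvVle : List Int → Int
  | [] => 0
  | a :: t => a + 10 * pvVle t

-- the ascending digit list rebuilt from per-digit counts
def pvAsc (L : List Int) : List Int :=
  ((List.range 10).map (fun d : Nat => List.replicate (L.count (d : Int)) ((d : Int)))).flatten

theorem pv_toDigits_mem {m : Nat} {c : Char} (h : c ∈ Nat.toDigits 10 m) : c ∈ pvDigits := by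
  induction m using Nat.strong_induction_on with
  | _ m ih =>
    rw [Nat.toDigits_eq_if (by norm_num)] at h
    by_cases hm : m < 10
    · simp [hm] at h
      subst h
      interval_cases m <;> decide
    · simp [hm] at h
      rcases h with h | h
      · exact ih _ (Nat.div_lt_self (by omega) (by norm_num)) h
      · subst h
        have : m % 10 < 10 := Nat.mod_lt _ (by norm_num)
        interval_cases h : m % 10 <;> simp_all <;> decide

theorem pv_ofChars_digit {c : Char} (h : c ∈ pvDigits) :
    PySem.Int.ofChars? [c] = some (pvDv c) := by
  fin_cases h <;> decide

theorem pv_dv_range {c : Char} (h : c ∈ pvDigits) : 0 ≤ pvDv c ∧ pvDv c < 10 := by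
  fin_cases h <;> decide

theorem pv_getD_set (l : List Int) (i j : Nat) (v d : Int) (h : i < l.length) :
    (l.set i v).getD j d = if i = j then v else l.getD j d := by
  simp [List.getD, List.getElem?_set, h]
  split_ifs with h1 h2 <;> simp_all

-- counting loop invariant: length stays 10 and slot d holds the count of digit d
theorem pv_counts (cs : List Char) (hcs : ∀ c ∈ cs, c ∈ pvDigits) :
    (cs.foldl ggAltStep (List.replicate 10 0)).length = 10 ∧
    ∀ d : Nat, d < 10 →
      (cs.foldl ggAltStep (List.replicate 10 0)).getD d 0
      = ((cs.map pvDv).count (d : Int) : Int) := by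
  induction cs using List.reverseRecOn with
  | nil => refine ⟨by simp, ?_⟩; intro d hd; interval_cases d <;> simp
  | append_singleton cs c ih =>
    have hc : c ∈ pvDigits := hcs c (by simp)
    have hcs' : ∀ c ∈ cs, c ∈ pvDigits := fun c h => hcs c (by simp [h])
    obtain ⟨ihlen, ihget⟩ := ih hcs'
    rw [List.foldl_append, List.foldl_cons, List.foldl_nil]
    have hstep : ggAltStep (cs.foldl ggAltStep (List.replicate 10 0)) c
        = (cs.foldl ggAltStep (List.replicate 10 0)).set (pvDv c).toNat
            ((cs.foldl ggAltStep (List.replicate 10 0)).getD (pvDv c).toNat 0 + 1) := by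
      simp [ggAltStep, pv_ofChars_digit hc]
    rw [hstep]
    have hr := pv_dv_range hc
    refine ⟨by rw [List.length_set]; exact ihlen, ?_⟩
    intro d hd
    rw [pv_getD_set _ _ _ _ _ (by rw [ihlen]; omega)]
    simp only [List.map_append, List.map_cons, List.map_nil, List.count_append]
    by_cases he : (pvDv c).toNat = d
    · rw [if_pos he, he, ihget d hd]
      have : pvDv c = (d : Int) := by omega
      simp [this]
    · rw [if_neg he, ihget d hd]
      have : pvDv c ≠ (d : Int) := by omega
      simp [this]

theorem pv_vle_append (M : List Int) (a : Int) :
    pvVle (M ++ [a]) = pvVle M + a * 10 ^ M.length := by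
  induction M with
  | nil => simp [pvVle]
  | cons b t ih => simp [pvVle, ih]; ring

theorem pv_vbe_gen (L : List Int) (n : Int) :
    L.foldl (fun n d => n * 10 + d) n = n * 10 ^ L.length + pvVle L.reverse := by
  induction L generalizing n with
  | nil => simp [pvVle]
  | cons a t ih =>
    simp [List.foldl_cons, ih, pv_vle_append]
    ring

theorem pv_vbe (L : List Int) :
    L.foldl (fun n d => n * 10 + d) 0 = pvVle L.reverse := by
  simp [pv_vbe_gen]

theorem pv_sum_vle0 (K : List Int) :
    ((List.range K.length).map (fun i => K.getD i 0 * 10 ^ i)).sum = pvVle K := by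
  induction K with
  | nil => simp [pvVle]
  | cons a t ih =>
    rw [List.length_cons, List.range_succ_eq_map]
    simp only [List.map_cons, List.map_map, List.sum_cons]
    have : ((List.range t.length).map (fun i => (a :: t).getD (i+1) 0 * 10 ^ (i+1))).sum
        = 10 * ((List.range t.length).map (fun i => t.getD i 0 * 10 ^ i)).sum := by
      rw [← List.sum_map_mul_left]
      congr 1
      apply List.map_congr_left
      intro i _
      simp [List.getD]
      ring
    rw [show ((fun i => (a :: t).getD i 0 * 10 ^ i) ∘ Nat.succ)
        = (fun i => (a :: t).getD (i+1) 0 * 10 ^ (i+1)) from rfl, this, ih]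
    simp [pvVle, List.getD]

-- A's second loop computes pvVle of the sorted list
theorem pv_sum_vle (K : List Int) (n : Int) (hn : n = PySem.List.len K) :
    (PySem.List.pyRange 0 n).foldl
      (fun num i => num + PySem.List.pyGetD K i 0 * 10 ^ i.toNat) 0 = pvVle K := by
  subst hn
  rw [PySem.List.foldl_add]
  show 0 + ((PySem.List.pyRange 0 ((K.length : Nat) : Int)).map _).sum = _
  rw [PySem.List.pyRange_zero_natCast, List.map_map]
  rw [← pv_sum_vle0 K, zero_add]
  congr 1
  apply List.map_congr_left
  intro i _
  simp [PySem.List.pyGetD_natCast, List.getD]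

theorem pv_list_sum_range (n : Nat) (f : Nat → Nat) :
    ((List.range n).map f).sum = ∑ i ∈ Finset.range n, f i := by
  induction n with
  | zero => simp
  | succ n ih => rw [List.range_succ, Finset.sum_range_succ, List.map_append]; simp [ih]

theorem pv_asc_perm (L : List Int) (hL : ∀ v ∈ L, 0 ≤ v ∧ v < 10) : (pvAsc L).Perm L := by
  rw [List.perm_iff_count]
  intro v
  rw [pvAsc, List.count_flatten, List.map_map]
  have hterm : ∀ d : Nat, (List.count v ∘ fun d : Nat => List.replicate (L.count (d : Int)) ((d : Int))) d
      = if d = v.toNat ∧ 0 ≤ v then L.count (d : Int) else 0 := by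
    intro d
    simp only [Function.comp_apply, List.count_replicate]
    by_cases h : v = (d : Int)
    · subst h
      rw [if_pos (by simp), if_pos (by omega)]
    · rw [if_neg (by simp; exact fun hh => h hh.symm),
        if_neg (by rintro ⟨rfl, h0⟩; exact h (by omega))]
  rw [List.map_congr_left (fun d _ => hterm d), pv_list_sum_range]
  by_cases hv : 0 ≤ v ∧ v < 10
  · rw [Finset.sum_congr rfl (fun d _ => if_congr (show (d = v.toNat ∧ 0 ≤ v) ↔ d = v.toNat from
        ⟨fun h => h.1, fun h => ⟨h, hv.1⟩⟩) rfl rfl)]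
    rw [Finset.sum_ite_eq' (Finset.range 10) v.toNat (fun d => L.count (d : Int))]
    rw [if_pos (Finset.mem_range.mpr (by omega))]
    congr 1
    omega
  · have h0 : L.count v = 0 := by
      rw [List.count_eq_zero]
      intro hmem
      exact hv ⟨(hL v hmem).1, (hL v hmem).2⟩
    rw [h0]
    rw [Finset.sum_congr rfl (fun d hd => if_neg (by
      rw [Finset.mem_range] at hd
      rintro ⟨rfl, h0v⟩
      exact hv ⟨h0v, by omega⟩))]
    simp

theorem pv_asc_pairwise (L : List Int) : List.Pairwise (· ≤ ·) (pvAsc L) := by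
  rw [pvAsc, List.pairwise_flatten]
  constructor
  · intro l hl
    simp only [List.mem_map] at hl
    obtain ⟨d, _, rfl⟩ := hl
    exact List.pairwise_replicate.mpr (Or.inr le_rfl)
  · rw [List.pairwise_map]
    apply List.Pairwise.imp ?_ (List.pairwise_lt_range (n := 10))
    intro d₁ d₂ h x hx y hy
    rw [List.eq_of_mem_replicate hx, List.eq_of_mem_replicate hy]
    exact_mod_cast Nat.le_of_lt h

-- the counting-sort output is the reverse of A's descending sort
theorem pv_asc_eq (L : List Int) (hL : ∀ v ∈ L, 0 ≤ v ∧ v < 10) :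
    pvAsc L = (PySem.List.sorted L (fun v => v) true).reverse := by
  have hperm : (pvAsc L).Perm ((PySem.List.sorted L (fun v => v) true).reverse) := by
    refine (pv_asc_perm L hL).trans (List.Perm.symm ?_)
    exact (List.reverse_perm _).trans (PySem.List.sorted_perm L (fun v => v) true)
  exact List.Perm.eq_of_pairwise (fun a b _ _ h1 h2 => le_antisymm h1 h2)
    (pv_asc_pairwise L)
    (List.pairwise_reverse.mpr (PySem.List.sorted_pairwise_rev L (fun v => v))) hperm

theorem pv_foldl_const {α β : Type} (l : List α) (f : β → β) (n : β) :
    l.foldl (fun a _ => f a) n = f^[l.length] n := by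
  induction l generalizing n with
  | nil => rfl
  | cons a t ih => simp [List.foldl_cons, ih, Function.iterate_succ_apply]

theorem pv_foldl_replicate (k : Nat) (v n : Int) :
    (List.replicate k v).foldl (fun n e => n * 10 + e) n = (fun m => m * 10 + v)^[k] n := by
  induction k generalizing n with
  | zero => rfl
  | succ k ih => simp [List.replicate_succ, List.foldl_cons, ih, Function.iterate_succ_apply]

-- B's inner loop over range(counts[d]) is the fold over replicate
theorem pv_fold_range_repl (k : Nat) (v n : Int) :
    (PySem.List.pyRange 0 ((k : Nat) : Int)).foldl (fun n _ => n * 10 + v) n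
      = (List.replicate k v).foldl (fun n e => n * 10 + e) n := by
  rw [pv_foldl_replicate, pv_foldl_const, PySem.List.pyRange_zero_natCast, List.length_map,
    List.length_range]

-- ===== VERDICT (by name: the statement is the Claim_ definition above) =====
theorem gg_spec : Claim_equal_gg := by
  intro x _ hx
  unfold Spec_gg gg gg_alt
  dsimp only
  have hx' : ¬ x < 0 := by unfold Pre_gg at hx; omega
  have hs : PySem.Int.toChars x = Nat.toDigits 10 x.toNat := by
    rw [PySem.Int.toChars, if_neg hx']
  have hdig : ∀ c ∈ PySem.Int.toChars x, c ∈ pvDigits := by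
    rw [hs]; exact fun c hc => pv_toDigits_mem hc
  -- A's first loop builds the digit list
  have hlmap : (PySem.List.pyRange 0 (PySem.List.len (PySem.Int.toChars x))).foldl
      (fun acc i => acc ++ [(PySem.Int.ofChars? [PySem.List.pyGetD (PySem.Int.toChars x) i ' ']).getD 0]) []
      = (PySem.Int.toChars x).map pvDv := by
    rw [PySem.List.foldl_append_singleton_eq_map, List.nil_append]
    rw [show (fun i => (PySem.Int.ofChars? [PySem.List.pyGetD (PySem.Int.toChars x) i ' ']).getD 0)
        = (fun c => (PySem.Int.ofChars? [c]).getD 0) ∘ (fun j => PySem.List.pyGetD (PySem.Int.toChars x) j ' ')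
        from rfl]
    rw [← List.map_map, PySem.List.map_pyGetD_pyRange_zero]
    exact List.map_congr_left (fun c hc => by rw [pv_ofChars_digit (hdig c hc)]; rfl)
  rw [hlmap]
  set L := (PySem.Int.toChars x).map pvDv with hLdef
  have hLb : ∀ v ∈ L, 0 ≤ v ∧ v < 10 := by
    intro v hv
    rw [hLdef, List.mem_map] at hv
    obtain ⟨c, hc, rfl⟩ := hv
    exact pv_dv_range (hdig c hc)
  -- A's value
  rw [pv_sum_vle (PySem.List.sorted L (fun v => v) true) _ (by
    show ((PySem.Int.toChars x).length : Int) = _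
    rw [show PySem.List.len (PySem.List.sorted L (fun v => v) true)
        = ((PySem.List.sorted L (fun v => v) true).length : Int) from rfl]
    rw [(PySem.List.sorted_perm L (fun v => v) true).length_eq, hLdef, List.length_map])]
  -- B's value
  obtain ⟨hclen, hcget⟩ := pv_counts (PySem.Int.toChars x) hdig
  have hinner : ∀ (d : Int), 0 ≤ d → d < 10 → ∀ acc : Int,
      (PySem.List.pyRange 0
          (PySem.List.pyGetD ((PySem.Int.toChars x).foldl ggAltStep (List.replicate 10 0)) d 0)).foldl
        (fun n _ => n * 10 + d) acc
      = (List.replicate (L.count d) d).foldl (fun n e => n * 10 + e) acc := by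
    intro d h0 h10 acc
    obtain ⟨dn, rfl⟩ : ∃ dn : Nat, d = (dn : Int) := ⟨d.toNat, by omega⟩
    rw [PySem.List.pyGetD_natCast, hcget dn (by omega), ← hLdef]
    exact pv_fold_range_repl (L.count (dn : Int)) ((dn : Int)) acc
  have hrhs : pvVle (PySem.List.sorted L (fun v => v) true)
      = (pvAsc L).foldl (fun n e => n * 10 + e) 0 := by
    rw [pv_vbe, pv_asc_eq L hLb, List.reverse_reverse]
  rw [hrhs]
  rw [show PySem.List.pyRange 0 10 = [0,1,2,3,4,5,6,7,8,9] from rfl]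
  simp only [List.foldl_cons, List.foldl_nil]
  rw [hinner 0 (by norm_num) (by norm_num), hinner 1 (by norm_num) (by norm_num),
    hinner 2 (by norm_num) (by norm_num), hinner 3 (by norm_num) (by norm_num),
    hinner 4 (by norm_num) (by norm_num), hinner 5 (by norm_num) (by norm_num),
    hinner 6 (by norm_num) (by norm_num), hinner 7 (by norm_num) (by norm_num),
    hinner 8 (by norm_num) (by norm_num), hinner 9 (by norm_num) (by norm_num)]
  simp only [pvAsc, show List.range 10 = [0,1,2,3,4,5,6,7,8,9] from rfl, List.map_cons,
    List.map_nil, List.flatten_cons, List.flatten_nil, List.foldl_append, List.foldl_nil,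
    List.append_nil, Nat.cast_ofNat, Nat.cast_zero, Nat.cast_one]
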